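-- pv_equiv track=rewrite | github.com/lapkin25/contest | jury/1 - factorial/sol_jury_factorial.py | calc_f
-- ===== SOURCE A (Python) =====
-- def calc_f(N, M):
--     N_str = str(N)
--     M_str = str(M)
--     # заводим два курсора
--     p = 0  # указывает на символ строки N_str
--     q = 0  # указывает на символ строки M_str
--     k = 0  # число вычеркиваний
--     # жадный алгоритм: двигаем указатели и вычеркиваем не совпадающие символы
--     while p < len(N_str) and q < len(M_str):
--         if N_str[p] == M_str[q]:
--             p += 1
--             q += 1
--         else:
--             p += 1
--             k += 1
--     # если M_str не удалось получить, вычеркивая цифры из N_str, то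
--     #   значение функции f не определено
--     if q < len(M_str):
--         return None
--     # вычеркиваем оставшиеся символы из N_str
--     while p < len(N_str):
--         p += 1
--         k += 1
--     return k
-- ===== SOURCE B (Python) =====
-- def calc_f(N, M):
--     n_str = str(N)
--     m_str = str(M)
--     it = iter(n_str)
--     if all(c in it for c in m_str):
--         return len(n_str) - len(m_str)
--     return None
-- ===== Notes on version B (the rewrite author's own statement) =====
-- stated objective: simpler
-- what changed: Replaces the cursor-and-counter loop plus trailing delete-the-rest loop with a decomposition: an idiomatic iterator-based subsequence test of str(M) against str(N), and a closed-form count len(str(N)) - len(str(M)) when it matches.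
import Mathlib
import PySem

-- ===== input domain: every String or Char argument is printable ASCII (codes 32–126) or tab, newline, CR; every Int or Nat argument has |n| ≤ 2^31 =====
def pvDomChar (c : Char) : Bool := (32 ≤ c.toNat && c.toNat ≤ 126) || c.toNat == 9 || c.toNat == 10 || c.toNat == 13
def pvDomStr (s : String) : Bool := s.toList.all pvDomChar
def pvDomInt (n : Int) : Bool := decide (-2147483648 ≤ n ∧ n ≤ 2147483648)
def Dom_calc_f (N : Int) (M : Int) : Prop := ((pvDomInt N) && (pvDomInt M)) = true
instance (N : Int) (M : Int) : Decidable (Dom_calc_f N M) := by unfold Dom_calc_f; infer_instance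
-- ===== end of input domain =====

-- B replaces A's cursor-and-counter greedy loop (plus trailing delete-the-rest loop)
-- by an iterator-style subsequence test and the closed form len(N_str) - len(M_str).

-- ===== PORT A =====
-- A's while loop over the two cursors, as structural recursion on the remaining
-- suffixes of N_str and M_str, carrying the deletion counter k.  The ms = [] case
-- covers both loop exits with q = len(M_str): the trailing while loop then adds the
-- number of remaining characters of N_str.
def calcfLoopA : List Char → List Char → Int → Option Int
  | ns, [], k => some (k + ns.length)
  | [], _ :: _, _ => none
  | a :: ns, b :: ms, k =>
      if a = b then calcfLoopA ns ms k else calcfLoopA ns (b :: ms) (k + 1)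

def calc_f (N : Int) (M : Int) : Option Int :=
  calcfLoopA (PySem.Int.toStr N).toList (PySem.Int.toStr M).toList 0

-- ===== PORT B =====
-- `c in it` on the iterator: advance past the first occurrence of c, if any.
def calcfSkipPast (c : Char) : List Char → Option (List Char)
  | [] => none
  | x :: xs => if x = c then some xs else calcfSkipPast c xs

-- `all(c in it for c in m_str)` over the iterator's remaining suffix.
def calcfAllIn : List Char → List Char → Bool
  | [], _ => true
  | c :: ms, ns =>
      match calcfSkipPast c ns with
      | none => false
      | some rest => calcfAllIn ms rest

def calc_f_alt (N : Int) (M : Int) : Option Int :=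
  let ns := (PySem.Int.toStr N).toList
  let ms := (PySem.Int.toStr M).toList
  if calcfAllIn ms ns then some ((ns.length : Int) - ms.length) else none

-- ===== PRECONDITION & SPEC =====
def Spec_calc_f (N : Int) (M : Int) (out : Option Int) : Prop := out = calc_f_alt N M
instance (N : Int) (M : Int) (out : Option Int) : Decidable (Spec_calc_f N M out) := by unfold Spec_calc_f; infer_instance

-- ===== CLAIM (what is proved, stated in full; the proofs are below) =====
def Claim_equal_calc_f : Prop := ∀ (N : Int) (M : Int), Dom_calc_f N M → Spec_calc_f N M (calc_f N M)

-- ===== LEMMAS AND PROOFS =====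
theorem calcfLoopA_eq (ns : List Char) : ∀ (ms : List Char) (k : Int),
    calcfLoopA ns ms k =
      if calcfAllIn ms ns then some (k + ns.length - ms.length) else none := by
  induction ns with
  | nil =>
      intro ms k
      cases ms with
      | nil => simp [calcfLoopA, calcfAllIn]
      | cons b ms => simp [calcfLoopA, calcfAllIn, calcfSkipPast]
  | cons a ns ih =>
      intro ms k
      cases ms with
      | nil => simp [calcfLoopA, calcfAllIn]
      | cons b ms =>
          by_cases hab : a = b
          · have h1 : calcfLoopA (a :: ns) (b :: ms) k = calcfLoopA ns ms k := by
              simp [calcfLoopA, hab]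
            have h2 : calcfAllIn (b :: ms) (a :: ns) = calcfAllIn ms ns := by
              simp [calcfAllIn, calcfSkipPast, hab]
            rw [h1, ih ms k, h2]
            split_ifs with h
            · congr 1; push_cast [List.length_cons]; ring
            · rfl
          · have h1 : calcfLoopA (a :: ns) (b :: ms) k = calcfLoopA ns (b :: ms) (k + 1) := by
              simp [calcfLoopA, hab]
            have h2 : calcfAllIn (b :: ms) (a :: ns) = calcfAllIn (b :: ms) ns := by
              simp [calcfAllIn, calcfSkipPast, hab]
            rw [h1, ih (b :: ms) (k + 1), h2]
            split_ifs with h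
            · congr 1; push_cast [List.length_cons]; ring
            · rfl

-- ===== VERDICT (by name: the statement is the Claim_ definition above) =====
theorem calc_f_spec : Claim_equal_calc_f := by
  intro N M _
  unfold Spec_calc_f calc_f calc_f_alt
  rw [calcfLoopA_eq]
  simp
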